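-- pv_equiv track=rewrite | github.com/mackst/Graphics.py | vulkanMeshLoader.py | vertexSize
-- ===== SOURCE A (Python) =====
-- class VertexLayout(object):
--
--     VERTEX_LAYOUT_POSITION = 0x0
--     VERTEX_LAYOUT_NORMAL = 0x1
--     VERTEX_LAYOUT_COLOR = 0x2
--     VERTEX_LAYOUT_UV = 0x3
--     VERTEX_LAYOUT_TANGENT = 0x4
--     VERTEX_LAYOUT_BITANGENT = 0x5
--     VERTEX_LAYOUT_DUMMY_FLOAT = 0x6
--     VERTEX_LAYOUT_DUMMY_VEC4 = 0x7
--
-- def vertexSize(layouts):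
--     vSize = 0
--     for layoutDetail in layouts:
--         if layoutDetail == VertexLayout.VERTEX_LAYOUT_UV:
--             vSize += 2 * 4
--         else:
--             vSize += 3 * 4
--     return vSize
-- ===== SOURCE B (Python) =====
-- class VertexLayout(object):
--
--     VERTEX_LAYOUT_POSITION = 0x0
--     VERTEX_LAYOUT_NORMAL = 0x1
--     VERTEX_LAYOUT_COLOR = 0x2
--     VERTEX_LAYOUT_UV = 0x3
--     VERTEX_LAYOUT_TANGENT = 0x4
--     VERTEX_LAYOUT_BITANGENT = 0x5
--     VERTEX_LAYOUT_DUMMY_FLOAT = 0x6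
--     VERTEX_LAYOUT_DUMMY_VEC4 = 0x7
--
-- def vertexSize(layouts):
--     # closed form: every entry is 12 bytes, except UV entries which are 8 (4 less)
--     return 12 * len(layouts) - 4 * layouts.count(VertexLayout.VERTEX_LAYOUT_UV)
-- ===== Notes on version B (the rewrite author's own statement) =====
-- stated objective: simpler
-- what changed: Replaced the per-element conditional accumulation loop with a closed-form expression 12*len(layouts) - 4*layouts.count(UV), pushing the scan into C-level len/count.
import Mathlib
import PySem

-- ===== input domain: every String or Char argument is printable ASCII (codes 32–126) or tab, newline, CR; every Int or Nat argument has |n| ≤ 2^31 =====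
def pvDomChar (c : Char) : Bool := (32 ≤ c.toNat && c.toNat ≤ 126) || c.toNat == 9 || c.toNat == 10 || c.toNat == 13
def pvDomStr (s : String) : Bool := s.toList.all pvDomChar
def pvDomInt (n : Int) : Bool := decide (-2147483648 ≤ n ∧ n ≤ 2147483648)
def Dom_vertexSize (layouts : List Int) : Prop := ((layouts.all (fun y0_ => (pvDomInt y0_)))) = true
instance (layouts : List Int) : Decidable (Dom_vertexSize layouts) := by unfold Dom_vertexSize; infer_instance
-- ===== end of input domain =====

-- ===== PORT A =====
-- B: closed form 12*len - 4*count(UV) instead of A's accumulation loop (simpler).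
def vertexSize (layouts : List Int) : Int :=
  layouts.foldl (fun vSize layoutDetail =>
    if layoutDetail == (3 : Int) then vSize + 2 * 4 else vSize + 3 * 4) 0

-- ===== PORT B =====
def vertexSize_alt (layouts : List Int) : Int :=
  12 * (layouts.length : Int) - 4 * (PySem.List.count layouts (3 : Int))

-- ===== PRECONDITION & SPEC =====
def Spec_vertexSize (layouts : List Int) (out : Int) : Prop := out = vertexSize_alt layouts
instance (layouts : List Int) (out : Int) : Decidable (Spec_vertexSize layouts out) := by unfold Spec_vertexSize; infer_instance

-- ===== CLAIM (what is proved, stated in full; the proofs are below) =====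
def Claim_equal_vertexSize : Prop := ∀ (layouts : List Int), Dom_vertexSize layouts → Spec_vertexSize layouts (vertexSize layouts)

-- ===== LEMMAS AND PROOFS =====

-- ===== VERDICT (by name: the statement is the Claim_ definition above) =====
theorem foldl_vertexSize (layouts : List Int) (acc : Int) :
    layouts.foldl (fun vSize layoutDetail =>
      if layoutDetail == (3 : Int) then vSize + 2 * 4 else vSize + 3 * 4) acc
    = acc + 12 * (layouts.length : Int) - 4 * (PySem.List.count layouts (3 : Int)) := by
  induction layouts generalizing acc with
  | nil => simp [PySem.List.count]
  | cons x xs ih =>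
    by_cases h : x = (3 : Int)
    · rw [List.foldl_cons, if_pos (by simp [h]), ih]
      simp [PySem.List.count, h]
      ring
    · rw [List.foldl_cons, if_neg (by simp [h]), ih]
      simp [PySem.List.count, h]
      ring

theorem vertexSize_spec : Claim_equal_vertexSize := by
  intro layouts _
  unfold Spec_vertexSize vertexSize vertexSize_alt
  rw [foldl_vertexSize]; ring
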